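-- pv_equiv track=rewrite | github.com/Aketami23/akiba_proteindesign | plot-code/fig2.py | convert_DM_tofull
-- ===== SOURCE A (Python) =====
-- def convert_DM_tofull(sparse_matrix):
--     elem = len(sparse_matrix)
--     full_matrix = [[0 for i in range(elem)] for j in range(elem)]
--     for i in range(len(sparse_matrix)):
--         for j in range(len(sparse_matrix[i])):
--             full_matrix[i][j+1+i] = sparse_matrix[i][j]
--             full_matrix[j+1+i][i] = sparse_matrix[i][j]
--
--     return full_matrix
-- ===== SOURCE B (Python) =====
-- def convert_DM_tofull(sparse_matrix):
--     n = len(sparse_matrix)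
--     full = []
--     for a, row in enumerate(sparse_matrix):
--         # left half by symmetry from the rows already built, then zeros
--         new = [full[b][a] for b in range(a)] + [0] * (n - a)
--         for j, v in enumerate(row):
--             new[a + 1 + j] = v
--         full.append(new)
--     return full
-- ===== Notes on version B (the rewrite author's own statement) =====
-- stated objective: alternative
-- what changed: B builds the full matrix incrementally row by row in a single pass, deriving each new row's left half by symmetry lookback into the rows already built (full[b][a] for b < a) and appending it, instead of A's preallocated n-by-n zero matrix filled by a double write into both mirrored cells across the whole matrix.
import Mathlib
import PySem

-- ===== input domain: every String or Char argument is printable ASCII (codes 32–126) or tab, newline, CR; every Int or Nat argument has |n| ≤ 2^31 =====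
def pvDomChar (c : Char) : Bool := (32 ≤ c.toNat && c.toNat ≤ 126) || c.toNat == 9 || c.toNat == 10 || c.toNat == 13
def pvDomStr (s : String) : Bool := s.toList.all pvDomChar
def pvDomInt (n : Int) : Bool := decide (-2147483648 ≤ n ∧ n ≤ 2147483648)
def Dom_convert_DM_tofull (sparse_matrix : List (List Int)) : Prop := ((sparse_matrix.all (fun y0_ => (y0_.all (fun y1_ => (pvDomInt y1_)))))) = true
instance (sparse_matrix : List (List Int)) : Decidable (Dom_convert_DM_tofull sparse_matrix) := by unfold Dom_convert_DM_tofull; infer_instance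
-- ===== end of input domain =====

-- B builds the matrix row by row in a single pass, deriving each row's left half
-- by symmetry from the rows already built, instead of A's preallocated n×n zero
-- matrix with a double write into both mirrored cells (alternative decomposition).

-- ===== PORT A =====
-- `matrix[r][c] = v` (always in range under Pre_; List.set is a no-op out of range,
-- which is where the Python raises IndexError — such inputs are outside Pre_)
def pvSetAt (m : List (List Int)) (r c : Nat) (v : Int) : List (List Int) :=
  m.set r ((m.getD r []).set c v)

def convert_DM_tofull (sparse_matrix : List (List Int)) : List (List Int) :=
  let elem := sparse_matrix.length
  let full := List.replicate elem (List.replicate elem (0 : Int))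
  (List.range sparse_matrix.length).foldl (fun full i =>
    (List.range (sparse_matrix.getD i []).length).foldl (fun full j =>
      pvSetAt (pvSetAt full i (j + 1 + i) ((sparse_matrix.getD i []).getD j 0)) (j + 1 + i) i
        ((sparse_matrix.getD i []).getD j 0)) full) full

-- ===== PORT B =====
-- B's loop body: `new[a+1+j] = v` is List.set (no-op out of range, where the
-- Python raises IndexError — such inputs are outside Pre_); the appended row
-- starts as the symmetric lookback into `full` plus zeros, as in Source B.
def convert_DM_tofull_alt (sparse_matrix : List (List Int)) : List (List Int) :=
  let n := sparse_matrix.length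
  (List.range n).foldl (fun full a =>
    full ++ [(List.range (sparse_matrix.getD a []).length).foldl
      (fun nr j => nr.set (a + 1 + j) ((sparse_matrix.getD a []).getD j 0))
      ((List.range a).map (fun b => (full.getD b []).getD a 0) ++
        List.replicate (n - a) (0 : Int))]) []

-- ===== PRECONDITION & SPEC =====
-- Pre_ holds exactly when every sparse row fits inside the triangle
-- (row i has at most elem-1-i entries); otherwise both Pythons raise IndexError.
def Pre_convert_DM_tofull (sparse_matrix : List (List Int)) : Prop :=
  ∀ i ∈ List.range sparse_matrix.length,
    (sparse_matrix.getD i []).length + i + 1 ≤ sparse_matrix.length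

instance (sparse_matrix : List (List Int)) : Decidable (Pre_convert_DM_tofull sparse_matrix) := by
  unfold Pre_convert_DM_tofull; infer_instance

def pvWitness_convert_DM_tofull : List (List Int) := [[1, 2], [3], []]

def Spec_convert_DM_tofull (sparse_matrix : List (List Int)) (out : List (List Int)) : Prop := out = convert_DM_tofull_alt sparse_matrix
instance (sparse_matrix : List (List Int)) (out : List (List Int)) : Decidable (Spec_convert_DM_tofull sparse_matrix out) := by unfold Spec_convert_DM_tofull; infer_instance

-- ===== CLAIM (what is proved, stated in full; the proofs are below) =====
def Claim_equal_convert_DM_tofull : Prop := ∀ (sparse_matrix : List (List Int)), Dom_convert_DM_tofull sparse_matrix → Pre_convert_DM_tofull sparse_matrix → Spec_convert_DM_tofull sparse_matrix (convert_DM_tofull sparse_matrix)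

-- ===== LEMMAS AND PROOFS =====

-- entry (a,b) of a matrix, 0 outside
def pvGetE (m : List (List Int)) (a b : Nat) : Int := (m.getD a []).getD b 0

-- the value of the full symmetric matrix at (a,b)
def pvG (sm : List (List Int)) (a b : Nat) : Int :=
  if a < b then (sm.getD a []).getD (b - 1 - a) 0
  else if b < a then (sm.getD b []).getD (a - 1 - b) 0
  else 0

def pvShape (m : List (List Int)) (n : Nat) : Prop :=
  m.length = n ∧ ∀ a, a < n → (m.getD a []).length = n

lemma getD_set (l : List (List Int)) (r : Nat) (x : List Int) (a : Nat) :
    (l.set r x).getD a [] = if a = r ∧ r < l.length then x else l.getD a [] := by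
  simp only [List.getD_eq_getElem?_getD, List.getElem?_set]
  split_ifs with h h1 h2 <;> simp_all

lemma getD_set_int (l : List Int) (i : Nat) (v : Int) (b : Nat) :
    (l.set i v).getD b 0 = if b = i ∧ i < l.length then v else l.getD b 0 := by
  simp only [List.getD_eq_getElem?_getD, List.getElem?_set]
  split_ifs with h h1 h2 <;> simp_all

lemma shape_setAt {m : List (List Int)} {n : Nat} (h : pvShape m n) (r c : Nat) (v : Int) :
    pvShape (pvSetAt m r c v) n := by
  obtain ⟨h1, h2⟩ := h
  refine ⟨by simp [pvSetAt, h1], fun a ha => ?_⟩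
  rw [pvSetAt, getD_set]
  split_ifs with hc
  · rw [List.length_set]; exact h2 r (h1 ▸ hc.2)
  · exact h2 a ha

lemma getE_setAt_self {m : List (List Int)} {n : Nat} (h : pvShape m n)
    {r c : Nat} (hr : r < n) (hc : c < n) (v : Int) :
    pvGetE (pvSetAt m r c v) r c = v := by
  obtain ⟨h1, h2⟩ := h
  rw [pvGetE, pvSetAt, getD_set]
  have hrl : r < m.length := h1 ▸ hr
  rw [if_pos ⟨rfl, hrl⟩, List.getD_eq_getElem?_getD, List.getElem?_set]
  have hcl : c < (m[r]?.getD []).length := by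
    rw [← List.getD_eq_getElem?_getD, h2 r hr]; exact hc
  simp [hcl]

lemma getE_setAt_ne {m : List (List Int)} {r c a b : Nat}
    (h : a ≠ r ∨ b ≠ c) (v : Int) :
    pvGetE (pvSetAt m r c v) a b = pvGetE m a b := by
  rw [pvGetE, pvSetAt, getD_set, pvGetE]
  rcases h with h | h
  · simp [h]
  · split_ifs with hc
    · rcases hc with ⟨rfl, _⟩
      rw [List.getD_eq_getElem?_getD, List.getElem?_set, List.getD_eq_getElem?_getD]
      simp [Ne.symm h]
    · rfl

-- a fold over a range preserves an invariant
lemma foldl_range_inv {σ : Type} (P : σ → Prop) (f : σ → Nat → σ) (s : σ) (m : Nat)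
    (h0 : P s) (hstep : ∀ s i, P s → P (f s i)) :
    P ((List.range m).foldl f s) := by
  induction m generalizing s with
  | zero => simpa using h0
  | succ m ih =>
    rw [List.range_succ, List.foldl_append]
    exact hstep _ _ (ih s h0)

-- A's inner loop: both mirrored cells get written
lemma getE_innerA (sm : List (List Int)) (n : Nat) (hn : n = sm.length)
    (i : Nat) (row : List Int) (hrow : row = sm.getD i []) (hi : i < n)
    (a b : Nat) (hb : b < n) :
    ∀ (m : Nat) (full : List (List Int)), pvShape full n → m + i + 1 ≤ n →
    pvGetE ((List.range m).foldl (fun u j =>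
        pvSetAt (pvSetAt u i (j + 1 + i) (row.getD j 0)) (j + 1 + i) i (row.getD j 0)) full) a b
      = if a = i ∧ i < b ∧ b < i + 1 + m then row.getD (b - 1 - i) 0
        else if b = i ∧ i < a ∧ a < i + 1 + m then row.getD (a - 1 - i) 0
        else pvGetE full a b := by
  intro m
  induction m with
  | zero =>
    intro full hsh hlen
    simp only [List.range_zero, List.foldl_nil]
    rw [if_neg (by omega), if_neg (by omega)]
  | succ m ih =>
    intro full hsh hlen
    rw [List.range_succ, List.foldl_append, List.foldl_cons, List.foldl_nil]
    set prev := (List.range m).foldl (fun u j =>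
        pvSetAt (pvSetAt u i (j + 1 + i) (row.getD j 0)) (j + 1 + i) i (row.getD j 0)) full
      with hprev
    have hshp : pvShape prev n := by
      rw [hprev]
      exact foldl_range_inv (fun mm => pvShape mm n) _ _ _ hsh
        (fun s j h => shape_setAt (shape_setAt h _ _ _) _ _ _)
    have hsh1 : pvShape (pvSetAt prev i (m + 1 + i) (row.getD m 0)) n := shape_setAt hshp _ _ _
    by_cases hc1 : a = i ∧ b = m + 1 + i
    · obtain ⟨rfl, rfl⟩ := hc1
      rw [getE_setAt_ne (by omega) _, getE_setAt_self hshp hi (by omega)]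
      have hm : ∀ t : Nat, m + 1 + t - 1 - t = m := fun t => by omega
      rw [if_pos ⟨rfl, by omega, by omega⟩, hm]
    · by_cases hc2 : a = m + 1 + i ∧ b = i
      · obtain ⟨rfl, rfl⟩ := hc2
        rw [getE_setAt_self hsh1 (by omega) hi]
        have hm : ∀ t : Nat, m + 1 + t - 1 - t = m := fun t => by omega
        rw [if_neg (by omega), if_pos ⟨rfl, by omega, by omega⟩, hm]
      · rw [getE_setAt_ne (by omega) _, getE_setAt_ne (by omega) _, ih full hsh (by omega)]
        split_ifs <;> first | rfl | omega

lemma shape_init (n : Nat) : pvShape (List.replicate n (List.replicate n (0 : Int))) n := by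
  refine ⟨by simp, fun a ha => ?_⟩
  rw [List.getD_eq_getElem?_getD, List.getElem?_replicate, if_pos ha]
  simp

lemma getE_init (n a b : Nat) : pvGetE (List.replicate n (List.replicate n (0 : Int))) a b = 0 := by
  simp only [pvGetE, List.getD_eq_getElem?_getD, List.getElem?_replicate]
  split_ifs <;> simp

-- A's pass: the result matrix is the full symmetric expansion
lemma getE_outerA (sm : List (List Int)) (n : Nat) (hn : n = sm.length)
    (hpre : Pre_convert_DM_tofull sm) (a b : Nat) (_ha : a < n) (hb : b < n) :
    ∀ k, k ≤ n →
    pvGetE ((List.range k).foldl (fun full i =>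
        (List.range (sm.getD i []).length).foldl (fun full j =>
          pvSetAt (pvSetAt full i (j + 1 + i) ((sm.getD i []).getD j 0)) (j + 1 + i) i
            ((sm.getD i []).getD j 0)) full)
        (List.replicate n (List.replicate n (0 : Int)))) a b
      = if a < k ∧ a < b then (sm.getD a []).getD (b - 1 - a) 0
        else if b < k ∧ b < a then (sm.getD b []).getD (a - 1 - b) 0
        else 0 := by
  intro k
  induction k with
  | zero =>
    intro _
    simp only [List.range_zero, List.foldl_nil, getE_init]
    rw [if_neg (by omega), if_neg (by omega)]
  | succ k ih =>
    intro hk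
    rw [List.range_succ, List.foldl_append, List.foldl_cons, List.foldl_nil]
    have hklen : (sm.getD k []).length + k + 1 ≤ n := by
      have := hpre k (by rw [List.mem_range]; omega)
      omega
    set prev := (List.range k).foldl (fun full i =>
        (List.range (sm.getD i []).length).foldl (fun full j =>
          pvSetAt (pvSetAt full i (j + 1 + i) ((sm.getD i []).getD j 0)) (j + 1 + i) i
            ((sm.getD i []).getD j 0)) full)
        (List.replicate n (List.replicate n (0 : Int))) with hprev
    have hshp : pvShape prev n := by
      rw [hprev]
      exact foldl_range_inv (fun mm => pvShape mm n) _ _ _ (shape_init n)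
        (fun s i h => foldl_range_inv (fun mm => pvShape mm n) _ _ _ h
          (fun s j h => shape_setAt (shape_setAt h _ _ _) _ _ _))
    rw [getE_innerA sm n hn k (sm.getD k []) rfl (by omega) a b hb _ prev hshp hklen,
      ih (by omega)]
    by_cases hC1 : a = k ∧ k < b ∧ b < k + 1 + (sm.getD k []).length
    · rw [if_pos hC1, if_pos (by omega)]
      obtain ⟨rfl, -, -⟩ := hC1
      rfl
    · rw [if_neg hC1]
      by_cases hC2 : b = k ∧ k < a ∧ a < k + 1 + (sm.getD k []).length
      · rw [if_pos hC2, if_neg (by omega), if_pos (by omega)]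
        obtain ⟨rfl, -, -⟩ := hC2
        rfl
      · rw [if_neg hC2]
        by_cases hP1 : a < k ∧ a < b
        · rw [if_pos hP1, if_pos (by omega)]
        · rw [if_neg hP1]
          by_cases hP2 : b < k ∧ b < a
          · rw [if_pos hP2, if_neg (by omega), if_pos (by omega)]
          · rw [if_neg hP2]
            by_cases hQ1 : a < k + 1 ∧ a < b
            · rw [if_pos hQ1]
              have hak : a = k := by omega
              subst hak
              exact (List.getD_eq_default _ _ (by omega)).symm
            · rw [if_neg hQ1]
              by_cases hQ2 : b < k + 1 ∧ b < a
              · rw [if_pos hQ2]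
                have hbk : b = k := by omega
                subst hbk
                exact (List.getD_eq_default _ _ (by omega)).symm
              · rw [if_neg hQ2]

-- a matrix with known shape and entries is the range-map of its entry function
lemma matrix_eq_map {m : List (List Int)} {n : Nat} (hsh : pvShape m n)
    (f : Nat → Nat → Int) (h : ∀ a b, a < n → b < n → pvGetE m a b = f a b) :
    m = (List.range n).map (fun a => (List.range n).map (fun b => f a b)) := by
  apply List.ext_getElem (by simp [hsh.1])
  intro a h1 h2
  have han : a < n := by simpa [hsh.1] using h1
  have hrow : m.getD a [] = m[a] := by
    rw [List.getD_eq_getElem?_getD, List.getElem?_eq_getElem h1]; rfl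
  simp only [List.getElem_map, List.getElem_range]
  apply List.ext_getElem
  · rw [← hrow, hsh.2 a han]; simp
  · intro b hb1 hb2
    have hbn : b < n := by
      have := hsh.2 a han
      rw [← hrow] at hb1; omega
    have hcell : (m.getD a []).getD b 0 = (m[a])[b] := by
      rw [hrow, List.getD_eq_getElem?_getD, List.getElem?_eq_getElem hb1]; rfl
    simp only [List.getElem_map, List.getElem_range]
    rw [← h a b han hbn, pvGetE, hcell]

lemma shape_A (sm : List (List Int)) : pvShape (convert_DM_tofull sm) sm.length := by
  rw [convert_DM_tofull]
  exact foldl_range_inv (fun mm => pvShape mm sm.length) _ _ _ (shape_init sm.length)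
    (fun s i h => foldl_range_inv (fun mm => pvShape mm sm.length) _ _ _ h
      (fun s j h => shape_setAt (shape_setAt h _ _ _) _ _ _))

-- A's result is the range-map of pvG
lemma A_eq_map (sm : List (List Int)) (hpre : Pre_convert_DM_tofull sm) :
    convert_DM_tofull sm
      = (List.range sm.length).map (fun a => (List.range sm.length).map (fun b => pvG sm a b)) := by
  refine matrix_eq_map (shape_A sm) (pvG sm) (fun a b ha hb => ?_)
  have h := getE_outerA sm sm.length rfl hpre a b ha hb sm.length le_rfl
  rw [convert_DM_tofull] at *
  rw [h, pvG]
  split_ifs <;> first | rfl | omega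

lemma setfold_length (row : List Int) (k m : Nat) (init : List Int) :
    ((List.range m).foldl (fun nr j => nr.set (k + 1 + j) (row.getD j 0)) init).length
      = init.length :=
  foldl_range_inv (fun nr : List Int => nr.length = init.length) _ _ _ rfl
    (fun s j h => by simpa using h)

-- B's inner loop: placing row entries at columns k+1+j, everything else untouched
lemma getD_setfold (row : List Int) (k b : Nat) :
    ∀ (m : Nat) (init : List Int), k + 1 + m ≤ init.length →
    ((List.range m).foldl (fun nr j => nr.set (k + 1 + j) (row.getD j 0)) init).getD b 0
      = if k < b ∧ b < k + 1 + m then row.getD (b - 1 - k) 0 else init.getD b 0 := by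
  intro m
  induction m with
  | zero =>
    intro init hlen
    simp only [List.range_zero, List.foldl_nil]
    rw [if_neg (by omega)]
  | succ m ih =>
    intro init hlen
    rw [List.range_succ, List.foldl_append, List.foldl_cons, List.foldl_nil]
    rw [getD_set_int, setfold_length, ih init (by omega)]
    split_ifs <;> first | rfl | omega | (congr 1; omega)

-- B's new row for index k, built from the already-correct rows, is row k of pvG
lemma rowB_eq (sm : List (List Int)) (n : Nat) (hn : n = sm.length)
    (hpre : Pre_convert_DM_tofull sm) (k : Nat) (hk : k < n) :
    (List.range (sm.getD k []).length).foldl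
        (fun nr j => nr.set (k + 1 + j) ((sm.getD k []).getD j 0))
        ((List.range k).map (fun b =>
            ((((List.range k).map (fun a => (List.range n).map (fun b => pvG sm a b))).getD b []).getD k 0)) ++
          List.replicate (n - k) (0 : Int))
      = (List.range n).map (fun b => pvG sm k b) := by
  have hklen : (sm.getD k []).length + k + 1 ≤ n := by
    have := hpre k (by rw [List.mem_range]; omega)
    omega
  set init := (List.range k).map (fun b =>
      ((((List.range k).map (fun a => (List.range n).map (fun b => pvG sm a b))).getD b []).getD k 0)) ++
    List.replicate (n - k) (0 : Int) with hinit
  have hinitlen : init.length = n := by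
    rw [hinit]; simp; omega
  have hinitget : ∀ b, b < n → init.getD b 0 = if b < k then pvG sm k b else 0 := by
    intro b hb
    by_cases hbk : b < k
    · have h1 : init.getD b 0
          = (((List.range k).map (fun a => (List.range n).map (fun c => pvG sm a c))).getD b []).getD k 0 := by
        rw [hinit, List.getD_eq_getElem?_getD, List.getElem?_append_left (by simp [hbk]),
          List.getElem?_map, List.getElem?_range hbk]
        rfl
      have h2 : ((List.range k).map (fun a => (List.range n).map (fun c => pvG sm a c))).getD b []
          = (List.range n).map (fun c => pvG sm b c) := by
        rw [List.getD_eq_getElem?_getD, List.getElem?_map, List.getElem?_range hbk]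
        rfl
      have h3 : ((List.range n).map (fun c => pvG sm b c)).getD k 0 = pvG sm b k := by
        rw [List.getD_eq_getElem?_getD, List.getElem?_map, List.getElem?_range hk]
        rfl
      have hsym : pvG sm b k = pvG sm k b := by
        rw [pvG, pvG]
        split_ifs <;> first | rfl | omega
      rw [h1, h2, h3, hsym, if_pos hbk]
    · rw [hinit, List.getD_eq_getElem?_getD, List.getElem?_append_right (by simp; omega)]
      simp only [List.length_map, List.length_range]
      rw [List.getElem?_replicate, if_pos (by omega), if_neg hbk]
      rfl
  apply List.ext_getElem
  · rw [setfold_length, hinitlen]; simp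
  · intro b hb1 hb2
    have hbn : b < n := by
      rw [setfold_length, hinitlen] at hb1; exact hb1
    have hgd : (((List.range (sm.getD k []).length).foldl
        (fun nr j => nr.set (k + 1 + j) ((sm.getD k []).getD j 0)) init)).getD b 0
        = pvG sm k b := by
      rw [getD_setfold _ _ _ _ init (by omega)]
      by_cases hA : k < b ∧ b < k + 1 + (sm.getD k []).length
      · rw [if_pos hA, pvG, if_pos hA.1]
      · rw [if_neg hA, hinitget b hbn]
        by_cases hbk : b < k
        · rw [if_pos hbk]
        · rw [if_neg hbk, pvG]
          rcases Nat.lt_trichotomy k b with h | h | h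
          · rw [if_pos h]
            exact (List.getD_eq_default _ _ (by omega)).symm
          · subst h
            simp
          · omega
    rw [List.getD_eq_getElem?_getD, List.getElem?_eq_getElem hb1] at hgd
    simp only [Option.getD_some] at hgd
    rw [hgd]
    simp [List.getElem_map, List.getElem_range]

-- B's outer loop: after k rows, the accumulator is the first k rows of the pvG map
lemma B_partial (sm : List (List Int)) (n : Nat) (hn : n = sm.length)
    (hpre : Pre_convert_DM_tofull sm) :
    ∀ k, k ≤ n →
    (List.range k).foldl (fun full a =>
        full ++ [(List.range (sm.getD a []).length).foldl
          (fun nr j => nr.set (a + 1 + j) ((sm.getD a []).getD j 0))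
          ((List.range a).map (fun b => (full.getD b []).getD a 0) ++
            List.replicate (n - a) (0 : Int))]) []
      = (List.range k).map (fun a => (List.range n).map (fun b => pvG sm a b)) := by
  intro k
  induction k with
  | zero => simp
  | succ k ih =>
    intro hk
    rw [List.range_succ, List.foldl_append, List.foldl_cons, List.foldl_nil, ih (by omega),
      List.map_append, List.map_cons, List.map_nil]
    congr 1
    rw [rowB_eq sm n hn hpre k (by omega)]

-- ===== VERDICT (by name: the statement is the Claim_ definition above) =====
theorem convert_DM_tofull_spec : Claim_equal_convert_DM_tofull := by
  intro sm _ hpre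
  unfold Spec_convert_DM_tofull convert_DM_tofull_alt
  rw [A_eq_map sm hpre, B_partial sm sm.length rfl hpre sm.length le_rfl]
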